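-- pv_equiv track=rewrite | github.com/TStand90/code-eval | locks/locks.py | second_beat
-- ===== SOURCE A (Python) =====
-- def second_beat(doors):
--     for x, door in enumerate(doors):
--         if (x + 1) % 3 == 0:
--             if doors[x]:
--                 doors[x] = False
--             else:
--                 doors[x] = True
--
--     return doors
-- ===== SOURCE B (Python) =====
-- def second_beat(doors):
--     doors[2::3] = [not d for d in doors[2::3]]
--     return doors
-- ===== Notes on version B (the rewrite author's own statement) =====
-- stated objective: idiomatic
-- what changed: Replaces the enumerate loop with its per-index modulo test and branchy in-place assignment by one strided slice assignment that toggles only every third element.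
import Mathlib
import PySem

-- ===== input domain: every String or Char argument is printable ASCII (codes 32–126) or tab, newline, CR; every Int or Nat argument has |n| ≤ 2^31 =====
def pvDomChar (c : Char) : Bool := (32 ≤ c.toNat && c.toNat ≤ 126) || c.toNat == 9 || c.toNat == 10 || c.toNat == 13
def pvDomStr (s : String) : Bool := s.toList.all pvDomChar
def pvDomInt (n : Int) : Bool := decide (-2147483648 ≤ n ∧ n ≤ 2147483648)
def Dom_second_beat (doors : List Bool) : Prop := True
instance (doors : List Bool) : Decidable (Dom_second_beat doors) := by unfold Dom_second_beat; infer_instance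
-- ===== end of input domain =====

-- B toggles every third element via a strided pass (Python B: one strided slice assignment),
-- instead of A's enumerate loop with a per-index modulo test; return value equivalence
-- (both Pythons also mutate the argument list in place).

-- ===== PORT A =====
-- for x, door in enumerate(doors): if (x+1)%3==0: toggle doors[x]; return doors
def second_beat (doors : List Bool) : List Bool :=
  (List.range doors.length).foldl
    (fun acc x =>
      if (x + 1) % 3 == 0 then
        match PySem.List.pyGet? acc (Int.ofNat x) with
        | some d => acc.set x (!d)
        | none => acc
      else acc)
    doors

-- ===== PORT B =====
-- doors[2::3] = [not d for d in doors[2::3]]: walk the list in strides of 3, negating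
-- each third element (the strided slice write, expressed structurally).
def second_beat_alt (doors : List Bool) : List Bool :=
  match doors with
  | a :: b :: c :: rest => a :: b :: (!c) :: second_beat_alt rest
  | l => l

-- ===== PRECONDITION & SPEC =====
def Spec_second_beat (doors : List Bool) (out : List Bool) : Prop := out = second_beat_alt doors
instance (doors : List Bool) (out : List Bool) : Decidable (Spec_second_beat doors out) := by unfold Spec_second_beat; infer_instance

-- ===== CLAIM (what is proved, stated in full; the proofs are below) =====
def Claim_equal_second_beat : Prop := ∀ (doors : List Bool), Dom_second_beat doors → Spec_second_beat doors (second_beat doors)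

-- ===== LEMMAS AND PROOFS =====

theorem pvMapIdx_cong {a b : Type} (f g : Nat → a → b) (l : List a)
    (h : ∀ i, i < l.length → ∀ x, f i x = g i x) : l.mapIdx f = l.mapIdx g := by
  apply List.ext_getElem (by simp)
  intro i h1 h2
  simp only [List.getElem_mapIdx]
  exact h i (by simpa using h1) _

-- the common characterisation: toggle exactly the indices i with (i+1) % 3 = 0
def pvTog (doors : List Bool) : List Bool :=
  doors.mapIdx (fun i d => if (i + 1) % 3 = 0 then !d else d)

theorem alt_eq_tog (doors : List Bool) : second_beat_alt doors = pvTog doors := by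
  unfold pvTog
  match doors with
  | [] => rfl
  | [a] => rfl
  | [a, b] => rfl
  | a :: b :: c :: rest =>
    simp only [second_beat_alt, List.mapIdx_cons]
    norm_num
    have h := alt_eq_tog rest
    unfold pvTog at h
    rw [h]
    apply pvMapIdx_cong
    intro i _ x
    have h3 : (i + 1 + 1 + 1 + 1) % 3 = (i + 1) % 3 := by omega
    simp [h3]

-- partial toggle: only indices < k toggled (the foldl invariant)
def pvTogLt (doors : List Bool) (k : Nat) : List Bool :=
  doors.mapIdx (fun i d => if i < k ∧ (i + 1) % 3 = 0 then !d else d)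

theorem togLt_len (doors : List Bool) (k : Nat) : (pvTogLt doors k).length = doors.length := by
  simp [pvTogLt]

theorem a_foldl_inv (doors : List Bool) (k : Nat) (hk : k ≤ doors.length) :
    (List.range k).foldl
      (fun acc x =>
        if (x + 1) % 3 == 0 then
          match PySem.List.pyGet? acc (Int.ofNat x) with
          | some d => acc.set x (!d)
          | none => acc
        else acc)
      doors = pvTogLt doors k := by
  induction k with
  | zero =>
    simp only [List.range_zero, List.foldl_nil]
    apply List.ext_getElem (by simp [togLt_len])
    intro i h1 h2
    simp [pvTogLt, List.getElem_mapIdx]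
  | succ k ih =>
    rw [List.range_succ, List.foldl_append, ih (by omega)]
    simp only [List.foldl_cons, List.foldl_nil]
    have hklt : k < doors.length := by omega
    have hlen : k < (pvTogLt doors k).length := by rw [togLt_len]; omega
    have hget : PySem.List.pyGet? (pvTogLt doors k) (Int.ofNat k) = some ((pvTogLt doors k)[k]) := by
      simp [PySem.List.pyGet?_natCast, List.getElem?_eq_getElem hlen]
    have hval : (pvTogLt doors k)[k] = doors[k] := by
      simp [pvTogLt, List.getElem_mapIdx]
    by_cases hm : (k + 1) % 3 = 0
    · have hb : ((k + 1) % 3 == 0) = true := by simp [hm]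
      rw [hb, if_pos rfl, hget, hval]
      show (pvTogLt doors k).set k (!doors[k]) = pvTogLt doors (k + 1)
      apply List.ext_getElem (by simp [togLt_len])
      intro i h1 h2
      have h1' : i < doors.length := by
        have := h1; rw [List.length_set, togLt_len] at this; exact this
      rw [List.getElem_set]
      simp only [pvTogLt, List.getElem_mapIdx]
      split_ifs <;> first | rfl | omega | simp_all
    · have hb : ((k + 1) % 3 == 0) = false := by simp [hm]
      rw [hb]
      simp only [Bool.false_eq_true, if_false]
      apply List.ext_getElem (by simp [togLt_len])
      intro i h1 h2
      have h1' : i < doors.length := by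
        have := h1; rw [togLt_len] at this; exact this
      simp only [pvTogLt, List.getElem_mapIdx]
      split_ifs <;> first | rfl | omega

theorem a_eq_tog (doors : List Bool) : second_beat doors = pvTog doors := by
  unfold second_beat
  rw [a_foldl_inv doors doors.length (le_refl _)]
  unfold pvTogLt pvTog
  apply pvMapIdx_cong
  intro i hi x
  simp [hi]

-- ===== VERDICT (by name: the statement is the Claim_ definition above) =====
theorem second_beat_spec : Claim_equal_second_beat := by
  intro doors _
  unfold Spec_second_beat
  rw [a_eq_tog, alt_eq_tog]
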